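-- pv_equiv track=rewrite | github.com/jkarnasiewicz/Notes | Codility.py | solution
-- ===== SOURCE A (Python) =====
-- def solution(A):
-- 	A = sorted(A)
-- 	for index, i in enumerate(A):
-- 		try:
-- 			if i + A[index+1] > A[index+2] and i + A[index+2] > A[index+1] and A[index+1] + A[index+2] > i:
-- 				return 1
-- 		except IndexError:
-- 			return 0
--
-- 	return 0
-- ===== SOURCE B (Python) =====
-- def solution(A):
--     n = len(A)
--     for i in range(n):
--         for j in range(i + 1, n):
--             for k in range(j + 1, n):
--                 if A[i] + A[j] > A[k] and A[i] + A[k] > A[j] and A[j] + A[k] > A[i]: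
--                     return 1
--     return 0
-- ===== Notes on version B (the rewrite author's own statement) =====
-- stated objective: alternative
-- what changed: Replaces sort-then-scan-of-consecutive-triples with a direct brute-force scan over all index triples i<j<k testing the full triangle inequality; no sorting and the input is traversed in its original order.
import Mathlib
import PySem

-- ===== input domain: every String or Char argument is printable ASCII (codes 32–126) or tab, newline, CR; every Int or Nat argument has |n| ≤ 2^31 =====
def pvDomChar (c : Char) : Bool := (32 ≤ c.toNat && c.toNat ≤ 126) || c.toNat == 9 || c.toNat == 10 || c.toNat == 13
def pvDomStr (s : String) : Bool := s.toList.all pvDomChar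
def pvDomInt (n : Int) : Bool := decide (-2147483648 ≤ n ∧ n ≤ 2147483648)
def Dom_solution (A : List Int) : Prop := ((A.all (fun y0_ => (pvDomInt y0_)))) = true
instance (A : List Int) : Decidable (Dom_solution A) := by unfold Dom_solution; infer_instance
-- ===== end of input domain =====

-- B replaces A's sort-plus-consecutive-triple scan with a brute-force scan of all
-- index triples i<j<k in the original order (alternative algorithm, not faster).

-- ===== PORT A =====
-- the for-loop over enumerate(sorted(A)): `rest` is the not-yet-visited suffix, `idx` the
-- enumerate counter; the try/except IndexError returns 0 as soon as S[idx+1] or S[idx+2]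
-- is out of range (Python evaluates both in the first comparison).
def loopA (S : List Int) : List Int → Nat → Int
  | [], _ => 0
  | i :: rest, idx =>
    match PySem.List.pyGet? S ((idx : Int) + 1), PySem.List.pyGet? S ((idx : Int) + 2) with
    | some a1, some a2 =>
        if i + a1 > a2 ∧ i + a2 > a1 ∧ a1 + a2 > i then 1 else loopA S rest (idx + 1)
    | _, _ => 0

def solution (A : List Int) : Int :=
  let S := PySem.List.sorted A (fun x => x) false
  loopA S S 0

-- ===== PORT B =====
def triB (a b c : Int) : Bool := a + b > c && a + c > b && b + c > a

def solution_alt (A : List Int) : Int :=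
  let n : Int := A.length
  if (PySem.List.pyRange 0 n 1).any (fun i =>
       (PySem.List.pyRange (i + 1) n 1).any (fun j =>
         (PySem.List.pyRange (j + 1) n 1).any (fun k =>
           triB (PySem.List.pyGetD A i 0) (PySem.List.pyGetD A j 0) (PySem.List.pyGetD A k 0))))
  then 1 else 0

-- ===== PRECONDITION & SPEC =====
def Spec_solution (A : List Int) (out : Int) : Prop := out = solution_alt A
instance (A : List Int) (out : Int) : Decidable (Spec_solution A out) := by unfold Spec_solution; infer_instance

-- ===== CLAIM (what is proved, stated in full; the proofs are below) =====
def Claim_equal_solution : Prop := ∀ (A : List Int), Dom_solution A → Spec_solution A (solution A)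

-- ===== LEMMAS AND PROOFS =====

/-- Triangle triple at increasing positions. -/
def Tri (a b c : Int) : Prop := a + b > c ∧ a + c > b ∧ b + c > a

def EX (l : List Int) : Prop :=
  ∃ (i j k : Nat), ∃ (_ : i < j) (_ : j < k) (hk : k < l.length),
    Tri (l[i]'(by omega)) (l[j]'(by omega)) (l[k]'hk)

def EXc (l : List Int) : Prop :=
  ∃ (t : Nat) (h : t + 2 < l.length),
    Tri (l[t]'(by omega)) (l[t+1]'(by omega)) (l[t+2]'h)

theorem perm_pair' {a b c d : Int} (h : List.Perm [a, b] [c, d]) :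
    (a = c ∧ b = d) ∨ (a = d ∧ b = c) := by
  have ha : a ∈ [c, d] := h.mem_iff.mp (by simp)
  simp only [List.mem_cons, List.not_mem_nil, or_false] at ha
  rcases ha with rfl | rfl
  · left
    have h' := (List.perm_cons a).mp h
    exact ⟨rfl, by simpa using List.perm_singleton.mp h'⟩
  · right
    have hsw : List.Perm [c, a] [a, c] := List.Perm.swap a c []
    have h' := (List.perm_cons a).mp (h.trans hsw)
    exact ⟨rfl, by simpa using List.perm_singleton.mp h'⟩

theorem tri_perm {a b c x y z : Int} (h : List.Perm [a,b,c] [x,y,z]) (ht : Tri x y z) :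
    Tri a b c := by
  obtain ⟨h1, h2, h3⟩ := ht
  have ha : a ∈ [x, y, z] := h.mem_iff.mp (by simp)
  simp only [List.mem_cons, List.not_mem_nil, or_false] at ha
  rcases ha with rfl | rfl | rfl
  · have hp := perm_pair' ((List.perm_cons a).mp h)
    rcases hp with ⟨rfl, rfl⟩ | ⟨rfl, rfl⟩ <;> exact ⟨by omega, by omega, by omega⟩
  · have hsw : List.Perm [x, a, z] [a, x, z] := List.Perm.swap a x [z]
    have hp := perm_pair' ((List.perm_cons a).mp (h.trans hsw))
    rcases hp with ⟨rfl, rfl⟩ | ⟨rfl, rfl⟩ <;> exact ⟨by omega, by omega, by omega⟩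
  · have s1 : List.Perm [x, y, a] [x, a, y] := List.Perm.cons x (List.Perm.swap y a []).symm
    have s2 : List.Perm [x, a, y] [a, x, y] := List.Perm.swap a x [y]
    have hp := perm_pair' ((List.perm_cons a).mp (h.trans (s1.trans s2)))
    rcases hp with ⟨rfl, rfl⟩ | ⟨rfl, rfl⟩ <;> exact ⟨by omega, by omega, by omega⟩

theorem cons_getElem_sublist (l : List Int) (i : Nat) (hi : i < l.length) (s : List Int)
    (hs : List.Sublist s (l.drop (i + 1))) : List.Sublist ((l[i]'hi) :: s) l := by
  have h1 : List.Sublist ((l[i]'hi) :: s) ((l[i]'hi) :: l.drop (i + 1)) :=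
    List.Sublist.cons₂ _ hs
  have h2 : (l[i]'hi) :: l.drop (i + 1) = l.drop i := List.getElem_cons_drop hi
  exact (h2 ▸ h1).trans (List.drop_sublist i l)

theorem getElem_drop' (l : List Int) (i j : Nat) (h : i + j < l.length) :
    (l.drop i)[j]'(by simp; omega) = l[i + j]'h := by
  simp

theorem triple_sublist (l : List Int) (i j k : Nat) (hij : i < j) (hjk : j < k)
    (hk : k < l.length) :
    List.Sublist [l[i]'(by omega), l[j]'(by omega), l[k]'hk] l := by
  apply cons_getElem_sublist l i (by omega)
  have hj' : (i + 1) + (j - (i+1)) < l.length := by omega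
  have ej : (l.drop (i+1))[j - (i+1)]'(by simp; omega) = l[j]'(by omega) := by
    have := getElem_drop' l (i+1) (j - (i+1)) hj'
    simp only [this]; congr 1; omega
  rw [← ej]
  apply cons_getElem_sublist
  have hk2 : (j + 1) + (k - (j+1)) < l.length := by omega
  have ek : ((l.drop (i+1)).drop ((j - (i+1)) + 1))[k - (j+1)]'(by simp; omega)
      = l[k]'hk := by
    simp only [List.getElem_drop]
    congr 1; omega
  rw [← ek]
  exact List.singleton_sublist.mpr (List.getElem_mem _)

theorem exists_pair_of_sublist {a b : Int} :
    ∀ {l : List Int}, List.Sublist [a, b] l →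
      ∃ (i j : Nat), ∃ (_ : i < j) (hj : j < l.length), l[i]'(by omega) = a ∧ l[j]'hj = b := by
  intro l h
  induction l with
  | nil => cases h
  | cons x t ih =>
    cases h with
    | cons _ h' =>
      obtain ⟨i, j, hij, hj, ha, hb⟩ := ih h'
      exact ⟨i + 1, j + 1, by omega, by simpa using Nat.succ_lt_succ hj, by simpa using ha,
        by simpa using hb⟩
    | cons₂ _ h' =>
      have hb : b ∈ t := by
        have := h'.subset; simp at this; exact this
      obtain ⟨j, hj, hbj⟩ := List.mem_iff_getElem.mp hb
      exact ⟨0, j + 1, by omega, by simpa using Nat.succ_lt_succ hj, rfl, by simpa using hbj⟩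

theorem exists_triple_of_sublist {a b c : Int} :
    ∀ {l : List Int}, List.Sublist [a, b, c] l →
      ∃ (i j k : Nat), ∃ (_ : i < j) (_ : j < k) (hk : k < l.length),
        l[i]'(by omega) = a ∧ l[j]'(by omega) = b ∧ l[k]'hk = c := by
  intro l h
  induction l with
  | nil => cases h
  | cons x t ih =>
    cases h with
    | cons _ h' =>
      obtain ⟨i, j, k, hij, hjk, hk, ha, hb, hc⟩ := ih h'
      exact ⟨i + 1, j + 1, k + 1, by omega, by omega, by simpa using Nat.succ_lt_succ hk,
        by simpa using ha, by simpa using hb, by simpa using hc⟩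
    | cons₂ _ h' =>
      obtain ⟨i, j, hij, hj, hb, hc⟩ := exists_pair_of_sublist h'
      exact ⟨0, i + 1, j + 1, by omega, by omega, by simpa using Nat.succ_lt_succ hj, rfl,
        by simpa using hb, by simpa using hc⟩

/-- EX as an order-free statement about sub-multisets. -/
theorem EX_iff_subperm (l : List Int) :
    EX l ↔ ∃ x y z, Tri x y z ∧ List.Subperm [x, y, z] l := by
  constructor
  · rintro ⟨i, j, k, hij, hjk, hk, ht⟩
    exact ⟨_, _, _, ht, (triple_sublist l i j k hij hjk hk).subperm⟩
  · rintro ⟨x, y, z, ht, s, hperm, hsub⟩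
    have hlen : s.length = 3 := by simpa using hperm.length_eq
    match s, hlen with
    | [a, b, c], _ =>
      obtain ⟨i, j, k, hij, hjk, hk, ha, hb, hc⟩ := exists_triple_of_sublist hsub
      exact ⟨i, j, k, hij, hjk, hk, by rw [ha, hb, hc]; exact tri_perm hperm ht⟩

theorem EX_perm {l m : List Int} (h : List.Perm l m) : EX l ↔ EX m := by
  rw [EX_iff_subperm, EX_iff_subperm]
  constructor <;> rintro ⟨x, y, z, ht, hs⟩
  · exact ⟨x, y, z, ht, (List.Perm.subperm_left h).mp hs⟩
  · exact ⟨x, y, z, ht, (List.Perm.subperm_left h).mpr hs⟩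

/-- On a `≤`-sorted list, an arbitrary triangle triple yields a consecutive one. -/
theorem EXc_of_EX_sorted {l : List Int} (hs : l.Pairwise (· ≤ ·)) (h : EX l) : EXc l := by
  obtain ⟨i, j, k, hij, hjk, hk, h1, h2, h3⟩ := h
  have hmono : ∀ (p q : Nat), ∀ (_ : p ≤ q) (hq : q < l.length), l[p]'(by omega) ≤ l[q]'hq := by
    intro p q hpq hq
    rcases Nat.lt_or_ge p q with hlt | hge
    · exact (List.pairwise_iff_getElem.mp hs) p q (by omega) hq hlt
    · have : p = q := by omega
      subst this; exact le_refl _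
  have hk2 : k - 2 + 2 < l.length := by omega
  have e1 : l[i]'(by omega) ≤ l[k-2]'(by omega) := hmono i (k-2) (by omega) (by omega)
  have e2 : l[j]'(by omega) ≤ l[k-2+1]'(by omega) := hmono j (k-2+1) (by omega) (by omega)
  have e3 : l[k-2+2]'(by omega) = l[k]'hk := by congr 1; omega
  have hab : l[k-2]'(by omega) ≤ l[k-2+1]'(by omega) := hmono (k-2) (k-2+1) (by omega) (by omega)
  have hbc : l[k-2+1]'(by omega) ≤ l[k-2+2]'(by omega) := hmono (k-2+1) (k-2+2) (by omega) hk2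
  rw [e3] at hbc
  exact ⟨k - 2, hk2, by rw [e3]; omega, by rw [e3]; omega, by rw [e3]; omega⟩

theorem EX_of_EXc {l : List Int} (h : EXc l) : EX l := by
  obtain ⟨t, ht, h1, h2, h3⟩ := h
  exact ⟨t, t+1, t+2, by omega, by omega, ht, h1, h2, h3⟩

/-- A's loop returns only 0 or 1. -/
theorem loopA_vals (S : List Int) : ∀ (rest : List Int) (idx : Nat),
    loopA S rest idx = 0 ∨ loopA S rest idx = 1 := by
  intro rest
  induction rest with
  | nil => intro idx; left; rfl
  | cons i t ih =>
    intro idx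
    rw [loopA]
    rcases PySem.List.pyGet? S ((idx : Int) + 1) with _ | a1
    · left; rfl
    · rcases PySem.List.pyGet? S ((idx : Int) + 2) with _ | a2
      · left; rfl
      · dsimp only
        by_cases hc : i + a1 > a2 ∧ i + a2 > a1 ∧ a1 + a2 > i
        · right; rw [if_pos hc]
        · rw [if_neg hc]; exact ih (idx + 1)

/-- Characterisation of A's loop: it returns 1 exactly when some consecutive
triple at position ≥ idx is a triangle. -/
theorem loopA_eq_one (S : List Int) :
    ∀ (rest : List Int) (idx : Nat), rest = S.drop idx →
      (loopA S rest idx = 1 ↔ ∃ (t : Nat) (h : t + 2 < S.length), idx ≤ t ∧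
          Tri (S[t]'(by omega)) (S[t+1]'(by omega)) (S[t+2]'h)) := by
  intro rest
  induction rest with
  | nil =>
    intro idx hdrop
    have hlen : S.length ≤ idx := by
      have := congrArg List.length hdrop
      simp [List.length_drop] at this
      omega
    constructor
    · intro h; exact absurd h (by simp [loopA])
    · rintro ⟨t, h, hle, _⟩; omega
  | cons i rest ih =>
    intro idx hdrop
    have hidx : idx < S.length := by
      by_contra hc
      rw [List.drop_eq_nil_of_le (by omega)] at hdrop
      exact List.cons_ne_nil _ _ hdrop
    have hcd : (S[idx]'hidx) :: S.drop (idx + 1) = S.drop idx := List.getElem_cons_drop hidx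
    rw [← hcd] at hdrop
    have hi : i = S[idx]'hidx := (List.cons.injEq .. ▸ hdrop).1
    have hrest : rest = S.drop (idx + 1) := (List.cons.injEq .. ▸ hdrop).2
    subst hi
    by_cases hb : idx + 2 < S.length
    · have g1 : PySem.List.pyGet? S ((idx : Int) + 1) = some (S[idx+1]'(by omega)) := by
        have he : ((idx : Int) + 1) = ((idx + 1 : Nat) : Int) := by push_cast; ring
        rw [he, PySem.List.pyGet?_natCast, List.getElem?_eq_getElem (by omega)]
      have g2 : PySem.List.pyGet? S ((idx : Int) + 2) = some (S[idx+2]'hb) := by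
        have he : ((idx : Int) + 2) = ((idx + 2 : Nat) : Int) := by push_cast; ring
        rw [he, PySem.List.pyGet?_natCast, List.getElem?_eq_getElem hb]
      rw [loopA, g1, g2]
      dsimp only
      by_cases hc : (S[idx]'hidx) + (S[idx+1]'(by omega)) > (S[idx+2]'hb) ∧
          (S[idx]'hidx) + (S[idx+2]'hb) > (S[idx+1]'(by omega)) ∧
          (S[idx+1]'(by omega)) + (S[idx+2]'hb) > (S[idx]'hidx)
      · rw [if_pos hc]
        exact ⟨fun _ => ⟨idx, hb, le_refl _, hc⟩, fun _ => rfl⟩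
      · rw [if_neg hc, ih (idx + 1) hrest]
        constructor
        · rintro ⟨t, h, hle, ht⟩; exact ⟨t, h, by omega, ht⟩
        · rintro ⟨t, h, hle, ht⟩
          refine ⟨t, h, ?_, ht⟩
          rcases Nat.eq_or_lt_of_le hle with rfl | hlt
          · exact absurd ht hc
          · omega
    · have hnone : PySem.List.pyGet? S ((idx : Int) + 1) = none ∨
          PySem.List.pyGet? S ((idx : Int) + 2) = none := by
        by_cases h1 : idx + 1 < S.length
        · right
          have he : ((idx : Int) + 2) = ((idx + 2 : Nat) : Int) := by push_cast; ring
          rw [he, PySem.List.pyGet?_natCast, List.getElem?_eq_none (by omega)]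
        · left
          have he : ((idx : Int) + 1) = ((idx + 1 : Nat) : Int) := by push_cast; ring
          rw [he, PySem.List.pyGet?_natCast, List.getElem?_eq_none (by omega)]
      constructor
      · intro h
        exfalso
        rw [loopA] at h
        rcases hnone with h1 | h1 <;> rw [h1] at h
        · rcases hg : PySem.List.pyGet? S ((idx : Int) + 2) with _ | v <;> rw [hg] at h <;>
            dsimp only at h <;> exact absurd h (by norm_num)
        · rcases hg : PySem.List.pyGet? S ((idx : Int) + 1) with _ | v <;> rw [hg] at h <;>
            dsimp only at h <;> exact absurd h (by norm_num)
      · rintro ⟨t, h, hle, _⟩; omega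

theorem solution_vals (A : List Int) : solution A = 0 ∨ solution A = 1 := by
  rw [solution]; exact loopA_vals _ _ _

theorem solution_eq_one (A : List Int) :
    solution A = 1 ↔ EXc (PySem.List.sorted A (fun x => x) false) := by
  rw [solution]
  rw [loopA_eq_one _ _ 0 (by rw [List.drop_zero])]
  constructor
  · rintro ⟨t, h, _, ht⟩; exact ⟨t, h, ht⟩
  · rintro ⟨t, h, ht⟩; exact ⟨t, h, Nat.zero_le _, ht⟩

theorem solution_alt_vals (A : List Int) : solution_alt A = 0 ∨ solution_alt A = 1 := by
  rw [solution_alt]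
  by_cases h : (PySem.List.pyRange 0 (A.length : Int) 1).any (fun i =>
       (PySem.List.pyRange (i + 1) (A.length : Int) 1).any (fun j =>
         (PySem.List.pyRange (j + 1) (A.length : Int) 1).any (fun k =>
           triB (PySem.List.pyGetD A i 0) (PySem.List.pyGetD A j 0) (PySem.List.pyGetD A k 0)))) = true
  · right; rw [if_pos h]
  · left; rw [if_neg h]

theorem solution_alt_eq_one (A : List Int) : solution_alt A = 1 ↔ EX A := by
  rw [solution_alt]
  have hiff : (PySem.List.pyRange 0 (A.length : Int) 1).any (fun i =>
       (PySem.List.pyRange (i + 1) (A.length : Int) 1).any (fun j =>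
         (PySem.List.pyRange (j + 1) (A.length : Int) 1).any (fun k =>
           triB (PySem.List.pyGetD A i 0) (PySem.List.pyGetD A j 0) (PySem.List.pyGetD A k 0)))) = true
      ↔ EX A := by
    simp only [List.any_eq_true, PySem.List.mem_pyRange_one]
    constructor
    · rintro ⟨i, ⟨hi0, hin⟩, j, ⟨hji, hjn⟩, k, ⟨hkj, hkn⟩, ht⟩
      refine ⟨i.toNat, j.toNat, k.toNat, by omega, by omega, by omega, ?_⟩
      have ei : PySem.List.pyGetD A i 0 = A[i.toNat]'(by omega) := by
        rw [PySem.List.pyGetD_of_nonneg]; exact List.getD_eq_getElem _ _ (by omega)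
        omega
      have ej : PySem.List.pyGetD A j 0 = A[j.toNat]'(by omega) := by
        rw [PySem.List.pyGetD_of_nonneg]; exact List.getD_eq_getElem _ _ (by omega)
        omega
      have ek : PySem.List.pyGetD A k 0 = A[k.toNat]'(by omega) := by
        rw [PySem.List.pyGetD_of_nonneg]; exact List.getD_eq_getElem _ _ (by omega)
        omega
      rw [ei, ej, ek] at ht
      simp only [triB, Bool.and_eq_true, decide_eq_true_eq] at ht
      exact ⟨ht.1.1, ht.1.2, ht.2⟩
    · rintro ⟨i, j, k, hij, hjk, hk, h1, h2, h3⟩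
      refine ⟨(i : Int), ⟨by omega, by omega⟩, (j : Int), ⟨by omega, by omega⟩,
        (k : Int), ⟨by omega, by omega⟩, ?_⟩
      have ei : PySem.List.pyGetD A (i : Int) 0 = A[i]'(by omega) := by
        rw [PySem.List.pyGetD_of_nonneg]
        simp only [Int.toNat_natCast]
        exact List.getD_eq_getElem _ _ (by omega)
        omega
      have ej : PySem.List.pyGetD A (j : Int) 0 = A[j]'(by omega) := by
        rw [PySem.List.pyGetD_of_nonneg]
        simp only [Int.toNat_natCast]
        exact List.getD_eq_getElem _ _ (by omega)
        omega
      have ek : PySem.List.pyGetD A (k : Int) 0 = A[k]'hk := by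
        rw [PySem.List.pyGetD_of_nonneg]
        simp only [Int.toNat_natCast]
        exact List.getD_eq_getElem _ _ (by omega)
        omega
      rw [ei, ej, ek]
      simp only [triB, Bool.and_eq_true, decide_eq_true_eq]
      exact ⟨⟨h1, h2⟩, h3⟩
  constructor
  · intro h
    by_contra hex
    rw [← hiff] at hex
    rw [if_neg hex] at h
    exact absurd h (by norm_num)
  · intro h
    rw [← hiff] at h
    rw [if_pos h]

-- ===== VERDICT (by name: the statement is the Claim_ definition above) =====
theorem solution_spec : Claim_equal_solution := by
  intro A _
  unfold Spec_solution
  have hperm : List.Perm (PySem.List.sorted A (fun x => x) false) A :=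
    PySem.List.sorted_perm A (fun x => x) false
  have hpair : (PySem.List.sorted A (fun x => x) false).Pairwise (· ≤ ·) := by
    simpa using PySem.List.sorted_pairwise A (fun x => x)
  have hmain : solution A = 1 ↔ solution_alt A = 1 := by
    rw [solution_eq_one, solution_alt_eq_one]
    constructor
    · intro h; exact (EX_perm hperm).mp (EX_of_EXc h)
    · intro h; exact EXc_of_EX_sorted hpair ((EX_perm hperm).mpr h)
  rcases solution_vals A with hA | hA <;> rcases solution_alt_vals A with hB | hB
  · rw [hA, hB]
  · exact absurd (hmain.mpr hB) (by rw [hA]; norm_num)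
  · exact absurd (hmain.mp hA) (by rw [hB]; norm_num)
  · rw [hA, hB]
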